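-- pv_equiv track=rewrite | github.com/thisisadityapatel/AoC | 2024/day3/task2.py | account_for
-- ===== SOURCE A (Python) =====
-- def account_for(do_positions, dont_positions, position):
--     closest_do = max([pos for pos in do_positions if pos < position], default=None)
--     closest_dont = max([pos for pos in dont_positions if pos < position], default=None)
--
--     if closest_do is None and closest_dont is None:
--         return True
--     elif closest_do is None:
--         return False
--     elif closest_dont is None:
--         return True
--     else:
--         return True if position - closest_do < position - closest_dont else False
-- ===== SOURCE B (Python) =====
-- def account_for(do_positions, dont_positions, position):
--     # Merge both marker lists into one event list tagged by kind (do=0, dont=1),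
--     # sort it lexicographically, then binary-search for the rightmost event
--     # strictly before `position`; its tag decides. Ties at the same position are
--     # handled by the sort order: the dont event (tag 1) sorts after the do event,
--     # matching A's strict comparison (equal distances -> disabled).
--     events = sorted([(p, 0) for p in do_positions] + [(p, 1) for p in dont_positions])
--     lo, hi = 0, len(events)
--     while lo < hi:
--         mid = (lo + hi) // 2
--         if events[mid][0] < position:
--             lo = mid + 1
--         else:
--             hi = mid
--     return lo == 0 or events[lo - 1][1] == 0
-- ===== Notes on version B (the rewrite author's own statement) =====
-- stated objective: alternative
-- what changed: Replaces the two filter-then-max passes and the four-way None branch chain by merging both lists into one kind-tagged event list, sorting it lexicographically, and hand-rolled binary search for the rightmost event before the position, whose tag alone decides (a dont at equal position sorts last, matching A's tie rule).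
import Mathlib
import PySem

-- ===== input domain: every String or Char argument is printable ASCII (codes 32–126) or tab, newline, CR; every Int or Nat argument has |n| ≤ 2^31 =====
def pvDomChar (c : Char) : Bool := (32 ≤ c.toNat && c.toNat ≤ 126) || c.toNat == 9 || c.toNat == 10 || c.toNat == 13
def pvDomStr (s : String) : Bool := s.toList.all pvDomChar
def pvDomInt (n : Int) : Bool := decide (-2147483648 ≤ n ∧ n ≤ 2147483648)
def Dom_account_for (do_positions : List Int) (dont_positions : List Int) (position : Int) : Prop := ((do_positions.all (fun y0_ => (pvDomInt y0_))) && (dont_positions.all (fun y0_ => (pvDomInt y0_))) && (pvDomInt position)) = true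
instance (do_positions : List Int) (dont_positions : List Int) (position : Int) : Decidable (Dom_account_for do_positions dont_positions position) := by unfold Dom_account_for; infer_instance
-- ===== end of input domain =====

-- B replaces A's two filter+max passes by sort-then-binary-search over one tagged event list (alternative algorithm; different traversal and data structure, not faster: O((n+m)^2) insertion sort in the port's model, Python O((n+m) log(n+m)) vs A's O(n+m)).


-- ===== PORT A =====
def account_for (do_positions : List Int) (dont_positions : List Int) (position : Int) : Bool :=
  let closest_do := PySem.List.max? (do_positions.filter (fun pos => decide (pos < position))) (fun y => y)
  let closest_dont := PySem.List.max? (dont_positions.filter (fun pos => decide (pos < position))) (fun y => y)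
  match closest_do, closest_dont with
  | none, none => true
  | none, some _ => false
  | some _, none => true
  | some d, some t => if position - d < position - t then true else false

-- ===== PORT B =====
-- the while-loop of Source B: lo, hi are Python ints that stay ≥ 0, so Nat and Nat '/' match
-- Python's '//' exactly; events[mid] is ported as getD with an always-in-range index
-- (0 ≤ lo ≤ mid < hi ≤ len throughout), where Python indexing returns the same element.
def pvBisect (events : List (Int × Int)) (position : Int) (lo hi : Nat) : Nat :=
  if lo < hi then
    let mid := (lo + hi) / 2
    if (events.getD mid (0, 0)).1 < position then pvBisect events position (mid + 1) hi
    else pvBisect events position lo mid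
  else lo
termination_by hi - lo
decreasing_by all_goals omega

def account_for_alt (do_positions : List Int) (dont_positions : List Int) (position : Int) : Bool :=
  let events := PySem.List.sorted2 ((do_positions.map (fun p => (p, (0 : Int)))) ++ (dont_positions.map (fun p => (p, (1 : Int))))) (fun e => e.1) (fun e => e.2) false
  let lo := pvBisect events position 0 events.length
  -- events[lo-1] with 1 ≤ lo ≤ len(events): in range, getD is exact
  lo == 0 || (events.getD (lo - 1) ((0 : Int), (0 : Int))).2 == 0

-- ===== PRECONDITION & SPEC =====
def Spec_account_for (do_positions : List Int) (dont_positions : List Int) (position : Int) (out : Bool) : Prop := out = account_for_alt do_positions dont_positions position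
instance (do_positions : List Int) (dont_positions : List Int) (position : Int) (out : Bool) : Decidable (Spec_account_for do_positions dont_positions position out) := by unfold Spec_account_for; infer_instance

-- ===== CLAIM (what is proved, stated in full; the proofs are below) =====
def Claim_equal_account_for : Prop := ∀ (do_positions : List Int) (dont_positions : List Int) (position : Int), Dom_account_for do_positions dont_positions position → Spec_account_for do_positions dont_positions position (account_for do_positions dont_positions position)

-- ===== LEMMAS AND PROOFS =====

-- Python's lexicographic ≤ on the tagged (position, kind) pairs
def lexLe (a b : Int × Int) : Prop := a.1 < b.1 ∨ (a.1 = b.1 ∧ a.2 ≤ b.2)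

theorem insertBy_pairwise_lex (x : Int × Int) (l : List (Int × Int))
    (h : l.Pairwise lexLe) :
    (PySem.List.insertBy (fun a b => decide (a.1 < b.1) || (!decide (b.1 < a.1) && decide (a.2 < b.2))) x l).Pairwise lexLe := by
  induction l with
  | nil => simp [PySem.List.insertBy, lexLe]
  | cons y ys ih =>
      simp only [PySem.List.insertBy]
      split_ifs with hb
      · refine List.Pairwise.cons ?_ h
        intro z hz
        have hxy : lexLe x y := by
          unfold lexLe
          rcases x with ⟨x1, x2⟩; rcases y with ⟨y1, y2⟩
          simp only [Bool.or_eq_true, Bool.and_eq_true, Bool.not_eq_true', decide_eq_true_eq, decide_eq_false_iff_not] at hb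
          omega
        rcases List.mem_cons.1 hz with rfl | hz
        · exact hxy
        · have hyz : lexLe y z := (List.pairwise_cons.1 h).1 z hz
          unfold lexLe at *; omega
      · have hys := (List.pairwise_cons.1 h).2
        refine List.Pairwise.cons ?_ (ih hys)
        intro z hz
        rw [PySem.List.insertBy_mem_iff] at hz
        rcases hz with rfl | hz
        · unfold lexLe
          rcases z with ⟨x1, x2⟩; rcases y with ⟨y1, y2⟩
          simp only [Bool.or_eq_true, Bool.and_eq_true, Bool.not_eq_true', decide_eq_true_eq, decide_eq_false_iff_not, not_or, not_and] at hb
          omega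
        · exact (List.pairwise_cons.1 h).1 z hz

theorem sorted2_pairwise_lex (es : List (Int × Int)) :
    (PySem.List.sorted2 es (fun e => e.1) (fun e => e.2) false).Pairwise lexLe := by
  show (es.foldl (fun acc x => PySem.List.insertBy _ x acc) []).Pairwise lexLe
  suffices h : ∀ (l acc : List (Int × Int)), acc.Pairwise lexLe →
      (l.foldl (fun acc x => PySem.List.insertBy (fun a b => decide (a.1 < b.1) || (!decide (b.1 < a.1) && decide (a.2 < b.2))) x acc) acc).Pairwise lexLe by
    exact h es [] (by simp)
  intro l
  induction l with
  | nil => intro acc h; simpa using h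
  | cons x xs ih => intro acc h; exact ih _ (insertBy_pairwise_lex x acc h)

theorem pvBisect_inv (E : List (Int × Int)) (pos : Int)
    (hmono : ∀ i j : Nat, i ≤ j → j < E.length → (E.getD j (0, 0)).1 < pos → (E.getD i (0, 0)).1 < pos) :
    ∀ (n lo hi : Nat), hi - lo ≤ n → lo ≤ hi → hi ≤ E.length →
      (∀ i < lo, (E.getD i (0, 0)).1 < pos) →
      (∀ i, hi ≤ i → i < E.length → ¬ (E.getD i (0, 0)).1 < pos) →
      (∀ i < pvBisect E pos lo hi, (E.getD i (0, 0)).1 < pos) ∧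
      (∀ i, pvBisect E pos lo hi ≤ i → i < E.length → ¬ (E.getD i (0, 0)).1 < pos) ∧
      pvBisect E pos lo hi ≤ E.length := by
  intro n
  induction n with
  | zero =>
      intro lo hi hn hle hhi hlo hhi2
      have : lo = hi := by omega
      subst this
      rw [pvBisect]
      simp only [lt_irrefl, if_false]
      exact ⟨hlo, fun i h1 h2 => hhi2 i h1 h2, hhi⟩
  | succ n ih =>
      intro lo hi hn hle hhi hlo hhi2
      rw [pvBisect]
      by_cases hlt : lo < hi
      · simp only [hlt, if_true]
        by_cases hc : (E.getD ((lo + hi) / 2) (0, 0)).1 < pos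
        · simp only [hc, if_true]
          refine ih ((lo + hi) / 2 + 1) hi (by omega) (by omega) hhi ?_ hhi2
          intro i hi'
          exact hmono i ((lo + hi) / 2) (by omega) (by omega) hc
        · simp only [hc, if_false]
          refine ih lo ((lo + hi) / 2) (by omega) (by omega) (by omega) hlo ?_
          intro i h1 h2 hp
          exact hc (hmono ((lo + hi) / 2) i h1 h2 hp)
      · simp only [hlt, if_false]
        have : lo = hi := by omega
        subst this
        exact ⟨hlo, fun i h1 h2 => hhi2 i h1 h2, hhi⟩

-- ===== VERDICT (by name: the statement is the Claim_ definition above) =====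
theorem account_for_spec : Claim_equal_account_for := by
  intro dp dn pos _
  unfold Spec_account_for
  simp only [account_for, account_for_alt]
  set E := PySem.List.sorted2 ((dp.map (fun p => (p, (0 : Int)))) ++ (dn.map (fun p => (p, (1 : Int))))) (fun e => e.1) (fun e => e.2) false with hE
  have hpw : E.Pairwise lexLe := sorted2_pairwise_lex _
  have hperm : E.Perm ((dp.map (fun p => (p, (0 : Int)))) ++ (dn.map (fun p => (p, (1 : Int))))) :=
    PySem.List.sorted2_perm _ _ _ _
  have hmem : ∀ e : Int × Int, e ∈ E ↔ (e.2 = 0 ∧ e.1 ∈ dp) ∨ (e.2 = 1 ∧ e.1 ∈ dn) := by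
    intro e
    rw [hperm.mem_iff, List.mem_append, List.mem_map, List.mem_map]
    constructor
    · rintro (⟨p, hp, rfl⟩ | ⟨p, hp, rfl⟩)
      · exact Or.inl ⟨rfl, hp⟩
      · exact Or.inr ⟨rfl, hp⟩
    · rcases e with ⟨p, t⟩
      rintro (⟨ht, hp⟩ | ⟨ht, hp⟩) <;> simp at ht <;> subst ht
      · exact Or.inl ⟨p, hp, rfl⟩
      · exact Or.inr ⟨p, hp, rfl⟩
  have hmono : ∀ i j : Nat, i ≤ j → j < E.length → (E.getD j (0, 0)).1 < pos → (E.getD i (0, 0)).1 < pos := by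
    intro i j hij hj hpred
    rcases Nat.eq_or_lt_of_le hij with rfl | hlt
    · exact hpred
    · have hle := List.pairwise_iff_getElem.1 hpw i j (lt_trans hlt hj) hj hlt
      rw [List.getD_eq_getElem _ _ (lt_trans hlt hj), List.getD_eq_getElem _ _ hj] at *
      unfold lexLe at hle
      omega
  obtain ⟨hr1, hr2, hr3⟩ := pvBisect_inv E pos hmono E.length 0 E.length (by omega) (by omega) le_rfl (by omega) (by intro i h1 h2; omega)
  set r := pvBisect E pos 0 E.length with hr
  have hr0 : r = 0 → ∀ e ∈ E, ¬ e.1 < pos := by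
    intro h0 e he hlt
    obtain ⟨i, hi, rfl⟩ := List.mem_iff_getElem.1 he
    exact hr2 i (by omega) hi (by rwa [List.getD_eq_getElem _ _ hi])
  have hstar : r ≠ 0 → (E.getD (r - 1) (0, 0)) ∈ E ∧ (E.getD (r - 1) (0, 0)).1 < pos ∧
      ∀ f ∈ E, f.1 < pos → lexLe f (E.getD (r - 1) (0, 0)) := by
    intro hne
    have hlen : r - 1 < E.length := by omega
    refine ⟨?_, hr1 (r - 1) (by omega), ?_⟩
    · rw [List.getD_eq_getElem _ _ hlen]; exact List.getElem_mem hlen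
    · intro f hf hflt
      obtain ⟨i, hi, rfl⟩ := List.mem_iff_getElem.1 hf
      have hir : i < r := by
        by_contra hge
        exact hr2 i (by omega) hi (by rwa [List.getD_eq_getElem _ _ hi])
      rcases Nat.lt_or_ge i (r - 1) with hlt | hge
      · have := List.pairwise_iff_getElem.1 hpw i (r - 1) hi hlen hlt
        rwa [List.getD_eq_getElem _ _ hlen]
      · have : i = r - 1 := by omega
        subst this
        rw [List.getD_eq_getElem _ _ hi]
        exact Or.inr ⟨rfl, le_rfl⟩
  -- case analysis on A's two maxima
  cases hdo : PySem.List.max? (dp.filter (fun q => decide (q < pos))) (fun y => y) with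
  | none =>
    have hdpf : dp.filter (fun q => decide (q < pos)) = [] := (PySem.List.max?_eq_none_iff _ _).1 hdo
    cases hdn : PySem.List.max? (dn.filter (fun q => decide (q < pos))) (fun y => y) with
    | none =>
      have hdnf : dn.filter (fun q => decide (q < pos)) = [] := (PySem.List.max?_eq_none_iff _ _).1 hdn
      have hz : r = 0 := by
        by_contra hne
        obtain ⟨hmemE, hlt, _⟩ := hstar hne
        rcases (hmem _).1 hmemE with ⟨_, hp⟩ | ⟨_, hp⟩
        · have : (E.getD (r - 1) (0, 0)).1 ∈ dp.filter (fun q => decide (q < pos)) :=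
            List.mem_filter.2 ⟨hp, by simpa using hlt⟩
          rw [hdpf] at this; exact absurd this (List.not_mem_nil)
        · have : (E.getD (r - 1) (0, 0)).1 ∈ dn.filter (fun q => decide (q < pos)) :=
            List.mem_filter.2 ⟨hp, by simpa using hlt⟩
          rw [hdnf] at this; exact absurd this (List.not_mem_nil)
      simp [hz]
    | some t =>
      have htm := PySem.List.max?_mem hdn
      have ht : t ∈ dn ∧ t < pos := by
        have := List.mem_filter.1 htm; simpa using this
      have hne : r ≠ 0 := by
        intro hz
        exact hr0 hz (t, 1) ((hmem _).2 (Or.inr ⟨rfl, ht.1⟩)) ht.2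
      obtain ⟨hmemE, hlt, _⟩ := hstar hne
      have htag : (E.getD (r - 1) (0, 0)).2 = 1 := by
        rcases (hmem _).1 hmemE with ⟨_, hp⟩ | ⟨h1, _⟩
        · have : (E.getD (r - 1) (0, 0)).1 ∈ dp.filter (fun q => decide (q < pos)) :=
            List.mem_filter.2 ⟨hp, by simpa using hlt⟩
          rw [hdpf] at this; exact absurd this (List.not_mem_nil)
        · exact h1
      rw [List.getD_eq_getElem?_getD] at htag
      simp [hne, htag]
  | some d =>
    have hdm := PySem.List.max?_mem hdo
    have hd : d ∈ dp ∧ d < pos := by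
      have := List.mem_filter.1 hdm; simpa using this
    have hdmax : ∀ y ∈ dp.filter (fun q => decide (q < pos)), y ≤ d := by
      intro y hy; exact PySem.List.max?_isMax hdo y hy
    have hne : r ≠ 0 := by
      intro hz
      exact hr0 hz (d, 0) ((hmem _).2 (Or.inl ⟨rfl, hd.1⟩)) hd.2
    obtain ⟨hmemE, hlt, hmax⟩ := hstar hne
    cases hdn : PySem.List.max? (dn.filter (fun q => decide (q < pos))) (fun y => y) with
    | none =>
      have hdnf : dn.filter (fun q => decide (q < pos)) = [] := (PySem.List.max?_eq_none_iff _ _).1 hdn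
      have htag : (E.getD (r - 1) (0, 0)).2 = 0 := by
        rcases (hmem _).1 hmemE with ⟨h1, _⟩ | ⟨_, hp⟩
        · exact h1
        · have : (E.getD (r - 1) (0, 0)).1 ∈ dn.filter (fun q => decide (q < pos)) :=
            List.mem_filter.2 ⟨hp, by simpa using hlt⟩
          rw [hdnf] at this; exact absurd this (List.not_mem_nil)
      rw [List.getD_eq_getElem?_getD] at htag
      simp [htag]
    | some t =>
      have htm := PySem.List.max?_mem hdn
      have ht : t ∈ dn ∧ t < pos := by
        have := List.mem_filter.1 htm; simpa using this
      have htmax : ∀ y ∈ dn.filter (fun q => decide (q < pos)), y ≤ t := by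
        intro y hy; exact PySem.List.max?_isMax hdn y hy
      have hled := hmax (d, 0) ((hmem _).2 (Or.inl ⟨rfl, hd.1⟩)) hd.2
      have hlet := hmax (t, 1) ((hmem _).2 (Or.inr ⟨rfl, ht.1⟩)) ht.2
      rcases (hmem _).1 hmemE with ⟨h1, hp⟩ | ⟨h1, hp⟩
      · -- nearest marker is a do: strictly closer than every dont
        have hfd : (E.getD (r - 1) (0, 0)).1 ≤ d :=
          hdmax _ (List.mem_filter.2 ⟨hp, by simpa using hlt⟩)
        have htd : t < d := by
          unfold lexLe at hled hlet; omega
        rw [List.getD_eq_getElem?_getD] at h1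
        simp [h1, show pos - d < pos - t by omega]
      · -- nearest marker is a dont (ties included): not closer for a do
        have hft : (E.getD (r - 1) (0, 0)).1 ≤ t :=
          htmax _ (List.mem_filter.2 ⟨hp, by simpa using hlt⟩)
        have hdt : d ≤ t := by
          unfold lexLe at hled hlet; omega
        rw [List.getD_eq_getElem?_getD] at h1
        simp [hne, h1, show ¬ (pos - d < pos - t) by omega]
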